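-- pv_equiv track=rewrite | github.com/alanese/adventofcode | advent-python/advent2016/day07.py | get_abas_babs
-- ===== SOURCE A (Python) =====
-- def classify_subsequences(sequence: str) -> tuple[list[str], list[str]]:
--     supernet: list[str] = []
--     hypernet: list[str] = []
--     current_subseq: str = ""
--     in_brackets: bool = False
--     for chr in sequence:
--         if in_brackets:
--             if chr == "]":
--                 in_brackets = False
--                 if current_subseq != "":
--                     hypernet.append(current_subseq)
--                     current_subseq = ""
--             else:
--                 current_subseq += chr
--         elif chr == "[":
--             in_brackets = True
--             if current_subseq != "":
--                 supernet.append(current_subseq)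
--                 current_subseq = ""
--         else:
--             current_subseq += chr
--     if current_subseq != "":
--         supernet.append(current_subseq)
--
--     return supernet, hypernet
--
-- def get_aba_patterns(sequence: str) -> list[str]:
--     seqs: list[str] = []
--     for i in range(len(sequence)-2):
--         if sequence[i] == sequence[i+2] and sequence[i] != sequence[i+1]:
--             seqs.append(sequence[i:i+3])
--     return seqs
--
-- def get_abas_babs(ip: str) -> tuple[set[str], set[str]]:
--     abas: set[str] = set()
--     babs: set[str] = set()
--     supernets: list[str]
--     hypernets: list[str]
--     supernets, hypernets = classify_subsequences(ip)
--     for supernet in supernets: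
--         for aba in get_aba_patterns(supernet):
--             abas.add(aba)
--     for hypernet in hypernets:
--         for bab in get_aba_patterns(hypernet):
--             babs.add(bab)
--     return abas, babs
-- ===== SOURCE B (Python) =====
-- def get_abas_babs(ip: str) -> tuple[set[str], set[str]]:
--     # Single linear scan: track bracket state and the last two chars of the
--     # current segment; triples found in a segment are buffered and committed
--     # to abas/babs when the segment ends (the trailing segment goes to abas).
--     abas: set[str] = set()
--     babs: set[str] = set()
--     in_brackets = False
--     w0 = w1 = None  # last two characters of the current segment
--     pending: list[str] = []
--     for ch in ip:
--         if ch == ("]" if in_brackets else "["):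
--             (babs if in_brackets else abas).update(pending)
--             pending = []
--             w0 = w1 = None
--             in_brackets = not in_brackets
--         else:
--             if w0 is not None and w0 == ch and w0 != w1:
--                 pending.append(w0 + w1 + ch)
--             w0, w1 = w1, ch
--     abas.update(pending)
--     return abas, babs
-- ===== Notes on version B (the rewrite author's own statement) =====
-- stated objective: alternative
-- what changed: Replaced the two-phase pipeline (split the address into supernet/hypernet segment lists, then run an index-based pattern pass over each segment) by a single linear scan over the string that keeps the bracket state and the last two characters of the current segment, buffering each segment's triples and committing them to abas/babs when the segment ends.
import Mathlib
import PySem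

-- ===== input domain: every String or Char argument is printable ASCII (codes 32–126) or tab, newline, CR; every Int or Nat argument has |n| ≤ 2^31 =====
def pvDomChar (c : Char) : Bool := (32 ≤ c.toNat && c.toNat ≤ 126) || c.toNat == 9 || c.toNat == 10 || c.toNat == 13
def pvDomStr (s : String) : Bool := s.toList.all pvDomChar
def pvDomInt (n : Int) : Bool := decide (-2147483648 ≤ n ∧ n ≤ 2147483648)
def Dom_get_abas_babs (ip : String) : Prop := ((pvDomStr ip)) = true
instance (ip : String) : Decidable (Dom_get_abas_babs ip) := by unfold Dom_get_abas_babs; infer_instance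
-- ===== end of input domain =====

-- B replaces A's two-phase pipeline (segment lists, then an index-based pattern pass per
-- segment) by one linear scan holding the bracket state and the last two segment chars
-- (objective: alternative decomposition, same O(n) cost).

-- ===== PORT A =====
-- helper classify_subsequences; the Python strings are ported on the List Char side
def pvClassifyStep (st : List (List Char) × List (List Char) × List Char × Bool) (c : Char) :
    List (List Char) × List (List Char) × List Char × Bool :=
  let (supernet, hypernet, cur, inb) := st
  if inb then
    if c = ']' then (supernet, (if cur ≠ [] then hypernet ++ [cur] else hypernet), [], false)
    else (supernet, hypernet, cur ++ [c], true)
  else if c = '[' then ((if cur ≠ [] then supernet ++ [cur] else supernet), hypernet, [], true)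
  else (supernet, hypernet, cur ++ [c], false)

def classify_subsequences (sequence : List Char) : List (List Char) × List (List Char) :=
  let r := sequence.foldl pvClassifyStep ([], [], [], false)
  ((if r.2.2.1 ≠ [] then r.1 ++ [r.2.2.1] else r.1), r.2.1)

def get_aba_patterns (sequence : List Char) : List String :=
  -- for i ∈ range(len-2), the indices i, i+1, i+2 are in bounds, so pyGetD's default
  -- is never consulted (exact on every input)
  (PySem.List.pyRange 0 ((sequence.length : Int) - 2)).foldl (fun seqs i =>
    if PySem.List.pyGetD sequence i ' ' = PySem.List.pyGetD sequence (i + 2) ' ' ∧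
       PySem.List.pyGetD sequence i ' ' ≠ PySem.List.pyGetD sequence (i + 1) ' '
    then seqs ++ [String.ofList (PySem.List.slice sequence (some i) (some (i + 3)))]
    else seqs) []

def get_abas_babs (ip : String) : List String × List String :=
  let sh := classify_subsequences ip.toList
  let abas : PySem.Set String :=
    sh.1.foldl (fun abas sup => (get_aba_patterns sup).foldl (fun s aba => PySem.Set.add s aba) abas)
      PySem.Set.empty
  let babs : PySem.Set String :=
    sh.2.foldl (fun babs hyp => (get_aba_patterns hyp).foldl (fun s bab => PySem.Set.add s bab) babs)
      PySem.Set.empty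
  (abas, babs)

-- ===== PORT B =====
-- state: (in_brackets, w0, w1, pending, abas, babs); in the scan w0 = some _ forces
-- w1 = some _ (w0 is only ever set from an older w1), so the two-some match is Source B's test
def pvScanStep (st : Bool × Option Char × Option Char × List String × List String × List String)
    (c : Char) : Bool × Option Char × Option Char × List String × List String × List String :=
  let (inb, w0, w1, pending, abas, babs) := st
  if c = (if inb then ']' else '[') then
    if inb then (false, none, none, [], abas, PySem.Set.update babs pending)
    else (true, none, none, [], PySem.Set.update abas pending, babs)
  else
    let pending' := match w0, w1 with
      | some a, some b => if a = c ∧ a ≠ b then pending ++ [String.ofList [a, b, c]] else pending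
      | _, _ => pending
    (inb, w1, some c, pending', abas, babs)

def get_abas_babs_alt (ip : String) : List String × List String :=
  let st := ip.toList.foldl pvScanStep (false, none, none, [], PySem.Set.empty, PySem.Set.empty)
  (PySem.Set.update st.2.2.2.2.1 st.2.2.2.1, st.2.2.2.2.2)

-- ===== PRECONDITION & SPEC =====
def Spec_get_abas_babs (ip : String) (out : List String × List String) : Prop := out = get_abas_babs_alt ip
instance (ip : String) (out : List String × List String) : Decidable (Spec_get_abas_babs ip out) := by unfold Spec_get_abas_babs; infer_instance

-- ===== CLAIM (what is proved, stated in full; the proofs are below) =====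
def Claim_equal_get_abas_babs : Prop := ∀ (ip : String), Dom_get_abas_babs ip → Spec_get_abas_babs ip (get_abas_babs ip)

-- ===== LEMMAS AND PROOFS =====

-- the last two characters of the current segment, as B's scan keeps them
def pvWin (l : List Char) : Option Char × Option Char := (l.dropLast.getLast?, l.getLast?)

-- A's double loop "for seg in segs: for p in get_aba_patterns(seg): s.add(p)"
def pvAbs (segs : List (List Char)) (s : PySem.Set String) : PySem.Set String :=
  segs.foldl (fun s seg => PySem.Set.update s (get_aba_patterns seg)) s

lemma pats_nil : get_aba_patterns [] = [] := rfl

lemma pats_snoc_core (v : List Char) (x y c : Char) :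
    get_aba_patterns ((v ++ [x, y]) ++ [c]) = get_aba_patterns (v ++ [x, y]) ++
      (if x = c ∧ x ≠ y then [String.ofList [x, y, c]] else []) := by
  have hL : ((v ++ [x, y]) ++ [c]) = v ++ [x, y, c] := by simp
  have hlen : (((v ++ [x, y]) ++ [c]).length : Int) - 2 = (((v ++ [x, y]).length : Int) - 2) + 1 := by
    simp; ring
  have hj : (((v ++ [x, y]).length : Int) - 2) = ((v.length : Nat) : Int) := by simp
  unfold get_aba_patterns
  rw [hlen, PySem.List.pyRange_one_succ_right (by simp : (0 : Int) ≤ ((v ++ [x, y]).length : Int) - 2),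
      List.foldl_append]
  have hfold : ∀ (acc : List String) (i : Int), i ∈ PySem.List.pyRange 0 (((v ++ [x, y]).length : Int) - 2) →
      (fun (seqs : List String) (i : Int) =>
        if PySem.List.pyGetD ((v ++ [x, y]) ++ [c]) i ' ' = PySem.List.pyGetD ((v ++ [x, y]) ++ [c]) (i + 2) ' ' ∧
           PySem.List.pyGetD ((v ++ [x, y]) ++ [c]) i ' ' ≠ PySem.List.pyGetD ((v ++ [x, y]) ++ [c]) (i + 1) ' '
        then seqs ++ [String.ofList (PySem.List.slice ((v ++ [x, y]) ++ [c]) (some i) (some (i + 3)))]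
        else seqs) acc i =
      (fun (seqs : List String) (i : Int) =>
        if PySem.List.pyGetD (v ++ [x, y]) i ' ' = PySem.List.pyGetD (v ++ [x, y]) (i + 2) ' ' ∧
           PySem.List.pyGetD (v ++ [x, y]) i ' ' ≠ PySem.List.pyGetD (v ++ [x, y]) (i + 1) ' '
        then seqs ++ [String.ofList (PySem.List.slice (v ++ [x, y]) (some i) (some (i + 3)))]
        else seqs) acc i := by
    intro acc i hi
    rw [PySem.List.mem_pyRange_one] at hi
    obtain ⟨h0i, h1i⟩ := hi
    have hiN : i = ((i.toNat : Nat) : Int) := (Int.toNat_of_nonneg h0i).symm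
    have hlt : i.toNat + 2 < (v ++ [x, y]).length := by simp at h1i ⊢; omega
    have hg : ∀ k : Nat, i.toNat + k < (v ++ [x, y]).length →
        PySem.List.pyGetD ((v ++ [x, y]) ++ [c]) (i + (k : Int)) ' ' = PySem.List.pyGetD (v ++ [x, y]) (i + (k : Int)) ' ' := by
      intro k hk
      rw [hiN, show ((i.toNat : Nat) : Int) + (k : Int) = ((i.toNat + k : Nat) : Int) by push_cast; ring,
          PySem.List.pyGetD_natCast, PySem.List.pyGetD_natCast]
      simp only [List.getD_eq_getElem?_getD, List.getElem?_append_left hk]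
    have hg0 := hg 0 (by omega)
    have hg1 := hg 1 (by omega)
    have hg2 := hg 2 (by omega)
    push_cast at hg0 hg1 hg2
    rw [add_zero] at hg0
    have hs : PySem.List.slice ((v ++ [x, y]) ++ [c]) (some i) (some (i + 3)) =
        PySem.List.slice (v ++ [x, y]) (some i) (some (i + 3)) := by
      rw [hiN, show ((i.toNat : Nat) : Int) + 3 = ((i.toNat + 3 : Nat) : Int) by push_cast; ring,
          PySem.List.slice_natCast, PySem.List.slice_natCast,
          List.drop_append_of_le_length (by omega), Nat.add_sub_cancel_left,
          List.take_append_of_le_length (by simp; omega)]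
    simp only [hg0, hg1, hg2, hs]
  rw [PySem.List.foldl_congr_mem _ _ _ _ hfold]
  have e0 : PySem.List.pyGetD ((v ++ [x, y]) ++ [c]) (((v ++ [x, y]).length : Int) - 2) ' ' = x := by
    rw [hj, hL, PySem.List.pyGetD_natCast]
    simp [List.getD_eq_getElem?_getD]
  have e1 : PySem.List.pyGetD ((v ++ [x, y]) ++ [c]) ((((v ++ [x, y]).length : Int) - 2) + 1) ' ' = y := by
    rw [hj, hL, show ((v.length : Nat) : Int) + 1 = ((v.length + 1 : Nat) : Int) by push_cast; ring,
        PySem.List.pyGetD_natCast]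
    simp [List.getD_eq_getElem?_getD]
  have e2 : PySem.List.pyGetD ((v ++ [x, y]) ++ [c]) ((((v ++ [x, y]).length : Int) - 2) + 2) ' ' = c := by
    rw [hj, hL, show ((v.length : Nat) : Int) + 2 = ((v.length + 2 : Nat) : Int) by push_cast; ring,
        PySem.List.pyGetD_natCast]
    simp [List.getD_eq_getElem?_getD]
  have e3 : PySem.List.slice ((v ++ [x, y]) ++ [c]) (some ((((v ++ [x, y]).length : Int) - 2)))
      (some ((((v ++ [x, y]).length : Int) - 2) + 3)) = [x, y, c] := by
    rw [hj, hL, show ((v.length : Nat) : Int) + 3 = ((v.length + 3 : Nat) : Int) by push_cast; ring,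
        PySem.List.slice_natCast, Nat.add_sub_cancel_left]
    rw [show v ++ [x, y, c] = v ++ [x, y, c] from rfl, List.drop_left]
    rfl
  simp only [List.foldl_cons, List.foldl_nil]
  simp only [e0, e1, e2, e3]
  split_ifs with h
  · rfl
  · simp

lemma pats_snoc (l : List Char) (c : Char) :
    get_aba_patterns (l ++ [c]) = get_aba_patterns l ++
      (match (pvWin l).1, (pvWin l).2 with
       | some a, some b => if a = c ∧ a ≠ b then [String.ofList [a, b, c]] else []
       | _, _ => []) := by
  rcases hrev : l.reverse with _ | ⟨y, _ | ⟨x, u⟩⟩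
  · have hl : l = [] := by simpa using congrArg List.reverse hrev
    subst hl
    have h1 : get_aba_patterns [c] = [] := rfl
    simp [h1, pats_nil, pvWin]
  · have hl : l = [y] := by simpa using congrArg List.reverse hrev
    subst hl
    have h1 : get_aba_patterns [y, c] = [] := rfl
    have h2 : get_aba_patterns [y] = [] := rfl
    simp [h1, h2, pvWin]
  · have hl : l = u.reverse ++ [x, y] := by simpa using congrArg List.reverse hrev
    subst hl
    have hw : pvWin (u.reverse ++ [x, y]) = (some x, some y) := by
      rw [show u.reverse ++ [x, y] = (u.reverse ++ [x]) ++ [y] by simp]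
      simp [pvWin]
    rw [pats_snoc_core, hw]

lemma abs_flush (segs : List (List Char)) (cur : List Char) :
    PySem.Set.update (pvAbs segs []) (get_aba_patterns cur) =
      pvAbs (if cur ≠ [] then segs ++ [cur] else segs) [] := by
  by_cases h : cur = []
  · simp [h, pats_nil, PySem.Set.update_nil]
  · simp [h, pvAbs, List.foldl_append]

lemma step_inv (sup hyp : List (List Char)) (cur : List Char) (inb : Bool) (c : Char) :
    pvScanStep (inb, (pvWin cur).1, (pvWin cur).2, get_aba_patterns cur, pvAbs sup [], pvAbs hyp []) c =
      (let r := pvClassifyStep (sup, hyp, cur, inb) c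
       (r.2.2.2, (pvWin r.2.2.1).1, (pvWin r.2.2.1).2, get_aba_patterns r.2.2.1,
        pvAbs r.1 [], pvAbs r.2.1 [])) := by
  have hw : pvWin (cur ++ [c]) = ((pvWin cur).2, some c) := by
    simp [pvWin]
  cases inb with
  | false =>
    by_cases hc : c = '['
    · subst hc
      simp [pvScanStep, pvClassifyStep, pvWin, pats_nil, abs_flush]
    · simp only [pvScanStep, pvClassifyStep, hc, Bool.false_eq_true, if_neg,
        not_false_eq_true]
      rcases h0 : (pvWin cur).1 with _ | a <;> rcases h1 : (pvWin cur).2 with _ | b <;>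
        simp [pats_snoc, hw, h0, h1] <;> split_ifs <;> simp
  | true =>
    by_cases hc : c = ']'
    · subst hc
      simp [pvScanStep, pvClassifyStep, pvWin, pats_nil, abs_flush]
    · simp only [pvScanStep, pvClassifyStep, hc, if_true, if_neg, not_false_eq_true]
      rcases h0 : (pvWin cur).1 with _ | a <;> rcases h1 : (pvWin cur).2 with _ | b <;>
        simp [pats_snoc, hw, h0, h1] <;> split_ifs <;> simp

lemma scan_inv (cs : List Char) (cur : List Char) (inb : Bool) (sup hyp : List (List Char)) :
    cs.foldl pvScanStep (inb, (pvWin cur).1, (pvWin cur).2, get_aba_patterns cur, pvAbs sup [], pvAbs hyp []) =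
      (let r := cs.foldl pvClassifyStep (sup, hyp, cur, inb)
       (r.2.2.2, (pvWin r.2.2.1).1, (pvWin r.2.2.1).2, get_aba_patterns r.2.2.1,
        pvAbs r.1 [], pvAbs r.2.1 [])) := by
  induction cs generalizing cur inb sup hyp with
  | nil => rfl
  | cons c cs ih =>
      rw [List.foldl_cons, step_inv]
      exact ih _ _ _ _

-- ===== VERDICT (by name: the statement is the Claim_ definition above) =====
theorem get_abas_babs_spec : Claim_equal_get_abas_babs := by
  intro ip _
  show get_abas_babs ip = get_abas_babs_alt ip
  -- the initial states of the two folds are definitionally those of scan_inv with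
  -- cur = [], sup = hyp = []
  have h0 : ip.toList.foldl pvScanStep (false, none, none, [], PySem.Set.empty, PySem.Set.empty)
      = (let r := ip.toList.foldl pvClassifyStep ([], [], [], false)
         (r.2.2.2, (pvWin r.2.2.1).1, (pvWin r.2.2.1).2, get_aba_patterns r.2.2.1,
          pvAbs r.1 [], pvAbs r.2.1 [])) := scan_inv ip.toList [] false [] []
  have hB : get_abas_babs_alt ip
      = (PySem.Set.update (pvAbs (ip.toList.foldl pvClassifyStep ([], [], [], false)).1 [])
          (get_aba_patterns (ip.toList.foldl pvClassifyStep ([], [], [], false)).2.2.1),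
         pvAbs (ip.toList.foldl pvClassifyStep ([], [], [], false)).2.1 []) :=
    congrArg (fun st : Bool × Option Char × Option Char × List String × List String × List String =>
      (PySem.Set.update st.2.2.2.2.1 st.2.2.2.1, st.2.2.2.2.2)) h0
  rw [hB, abs_flush]
  rfl
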